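-- pv_equiv track=rewrite | github.com/foundry-works/foundry-sandbox | unified-proxy/git_operations.py | _log_has_custom_decoration_format
-- ===== SOURCE A (Python) =====
-- from typing import Any, Dict, FrozenSet, Generator, List, Optional, Set, Tuple
--
-- def _log_has_custom_decoration_format(args: List[str]) -> bool:
--     """Detect if git log args use --format/--pretty with %d or %D."""
--     for idx, arg in enumerate(args):
--         for prefix in ("--format=", "--pretty=", "--pretty=format:"):
--             if arg.startswith(prefix):
--                 fmt = arg[len(prefix):]
--                 if "%d" in fmt or "%D" in fmt:
--                     return True
--         # Also check --format <value> and --pretty <value>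
--         if arg in ("--format", "--pretty") and idx + 1 < len(args):
--             fmt = args[idx + 1]
--             if "%d" in fmt or "%D" in fmt:
--                 return True
--     return False
-- ===== SOURCE B (Python) =====
-- from typing import List
--
-- def _log_has_custom_decoration_format(args: List[str]) -> bool:
--     """Two-pass: collect candidate format strings, then scan them for %d/%D."""
--     candidates = [a for a in args if a.startswith(("--format=", "--pretty="))]
--     candidates += [nxt for a, nxt in zip(args, args[1:]) if a in ("--format", "--pretty")]
--     return any("%d" in c or "%D" in c for c in candidates)
-- ===== Notes on version B (the rewrite author's own statement) =====
-- stated objective: simpler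
-- what changed: B splits A's inline early-return scan into two passes: it first collects candidate format strings (a filter for '--format='/'--pretty=' prefixed args, plus a zip of adjacent pairs for the '--format'/'--pretty' lookahead form, with no slicing and no redundant '--pretty=format:' case), then tests the collected candidates for '%d'/'%D' with any().
import Mathlib
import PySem

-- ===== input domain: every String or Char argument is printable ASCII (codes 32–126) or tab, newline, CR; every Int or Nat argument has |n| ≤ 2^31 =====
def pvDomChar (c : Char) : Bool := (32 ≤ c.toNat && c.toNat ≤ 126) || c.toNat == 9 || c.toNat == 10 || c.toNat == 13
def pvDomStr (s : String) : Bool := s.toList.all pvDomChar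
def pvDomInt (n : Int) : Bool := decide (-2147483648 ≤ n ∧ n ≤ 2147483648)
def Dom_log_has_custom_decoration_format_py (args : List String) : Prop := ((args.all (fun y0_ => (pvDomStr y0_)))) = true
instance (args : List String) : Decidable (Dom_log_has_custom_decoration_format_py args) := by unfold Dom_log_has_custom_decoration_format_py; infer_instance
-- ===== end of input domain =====

-- B replaces A's inline early-return scan by two passes (collect candidate format
-- strings via filter/zip, then scan them), dropping the redundant stripping and the
-- redundant third prefix; objective: simpler.

-- ===== PORT A =====
-- inner 'for prefix in (...)' loop with early return
def pvCheckPrefixesA (arg : String) : List String → Bool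
  | [] => false
  | p :: ps =>
    if PySem.Str.startswith arg p then
      let fmt := PySem.Str.slice arg (some (PySem.Str.len p : Int)) none
      if PySem.Str.isIn "%d" fmt || PySem.Str.isIn "%D" fmt then true
      else pvCheckPrefixesA arg ps
    else pvCheckPrefixesA arg ps

-- outer 'for idx, arg in enumerate(args)' loop with early returns
def pvLoopA (args : List String) (idx : Nat) : List String → Bool
  | [] => false
  | arg :: rest =>
    if pvCheckPrefixesA arg ["--format=", "--pretty=", "--pretty=format:"] then true
    else if (arg == "--format" || arg == "--pretty") && idx + 1 < args.length then
      let fmt := args.getD (idx + 1) ""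
      if PySem.Str.isIn "%d" fmt || PySem.Str.isIn "%D" fmt then true
      else pvLoopA args (idx + 1) rest
    else pvLoopA args (idx + 1) rest

def log_has_custom_decoration_format_py (args : List String) : Bool :=
  pvLoopA args 0 args

-- ===== PORT B =====
def log_has_custom_decoration_format_py_alt (args : List String) : Bool :=
  let candidates :=
    (args.filter (fun a => PySem.Str.startswith a "--format=" || PySem.Str.startswith a "--pretty="))
    ++ (((args.zip args.tail).filter (fun p => p.1 == "--format" || p.1 == "--pretty")).map Prod.snd)
  candidates.any (fun c => PySem.Str.isIn "%d" c || PySem.Str.isIn "%D" c)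

-- ===== PRECONDITION & SPEC =====
def Spec_log_has_custom_decoration_format_py (args : List String) (out : Bool) : Prop := out = log_has_custom_decoration_format_py_alt args
instance (args : List String) (out : Bool) : Decidable (Spec_log_has_custom_decoration_format_py args out) := by unfold Spec_log_has_custom_decoration_format_py; infer_instance

-- ===== CLAIM (what is proved, stated in full; the proofs are below) =====
def Claim_equal_log_has_custom_decoration_format_py : Prop := ∀ (args : List String), Dom_log_has_custom_decoration_format_py args → Spec_log_has_custom_decoration_format_py args (log_has_custom_decoration_format_py args)

-- ===== LEMMAS AND PROOFS =====

def pvDeco (s : String) : Bool := PySem.Str.isIn "%d" s || PySem.Str.isIn "%D" s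

-- "%c" occurs in p ++ r iff it occurs in r, when p contains no '%'
lemma pvIsIn_append (c : Char) (p r : List Char) (hp : '%' ∉ p) :
    PySem.Chars.isIn ['%', c] (p ++ r) = PySem.Chars.isIn ['%', c] r := by
  induction p with
  | nil => simp
  | cons x p ih =>
    have hx : x ≠ '%' := fun h => hp (by simp [h])
    have ih' := ih (fun h => hp (List.mem_cons_of_mem _ h))
    have hiff : (['%', c] <:+: p ++ r) ↔ (['%', c] <:+: r) := by
      rw [← PySem.Chars.isIn_iff_infix, ← PySem.Chars.isIn_iff_infix, ih']
    apply Bool.eq_iff_iff.2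
    rw [List.cons_append, PySem.Chars.isIn_iff_infix, PySem.Chars.isIn_iff_infix]
    constructor
    · intro h
      rcases List.infix_cons_iff.1 h with hpre | hinf
      · rcases hpre with ⟨t, ht⟩
        rw [List.cons_append, List.cons.injEq] at ht
        exact absurd ht.1.symm hx
      · exact hiff.1 hinf
    · intro h
      exact List.infix_cons_iff.2 (Or.inr (hiff.2 h))

lemma pvDeco_drop (p : String) (arg : String) (r : List Char)
    (hp : '%' ∉ p.toList) (h : arg.toList = p.toList ++ r) :
    (PySem.Chars.isIn "%d".toList arg.toList || PySem.Chars.isIn "%D".toList arg.toList)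
      = (PySem.Chars.isIn "%d".toList r || PySem.Chars.isIn "%D".toList r) := by
  rw [h]
  have h1 := pvIsIn_append 'd' p.toList r hp
  have h2 := pvIsIn_append 'D' p.toList r hp
  simp only [show ("%d" : String).toList = ['%', 'd'] from rfl,
             show ("%D" : String).toList = ['%', 'D'] from rfl] at *
  rw [h1, h2]

-- a matched prefix neither contains '%' nor splits a "%d"/"%D": stripping it keeps pvDeco
lemma pvStep (p arg : String) (hp : '%' ∉ p.toList)
    (hf : PySem.Str.startswith arg p = true) :
    (PySem.Str.isIn "%d" (PySem.Str.slice arg (some (PySem.Str.len p)) none)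
      || PySem.Str.isIn "%D" (PySem.Str.slice arg (some (PySem.Str.len p)) none))
      = pvDeco arg := by
  have hpre : p.toList <+: arg.toList := by
    rw [PySem.Str.startswith_eq] at hf
    exact (PySem.Chars.startswith_iff _ _).1 hf
  obtain ⟨r, hr⟩ := hpre
  have hfmt : (PySem.Str.slice arg (some (PySem.Str.len p)) none).toList = r := by
    rw [PySem.Str.toList_slice, PySem.Chars.slice_eq_listSlice,
        PySem.List.slice_from _ (by rw [PySem.Str.len_eq]; positivity)]
    simp only [PySem.Str.len_eq, Int.toNat_natCast, ← hr, List.drop_left]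
  simp only [PySem.Str.isIn_eq, hfmt, pvDeco]
  exact (pvDeco_drop p arg r hp hr.symm).symm

-- per-element facts: the prefixes are mutually exclusive / nested
lemma pvNotBoth (arg : String) (hF : PySem.Str.startswith arg "--format=" = true) :
    PySem.Str.startswith arg "--pretty=" = false := by
  rw [PySem.Str.startswith_eq] at *
  obtain ⟨r, hr⟩ := (PySem.Chars.startswith_iff _ _).1 hF
  refine Bool.eq_false_iff.2 (fun h => ?_)
  have hpre := (PySem.Chars.startswith_iff _ _).1 h
  rw [← hr] at hpre
  have ht := List.prefix_iff_eq_take.1 hpre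
  rw [List.take_left' (by decide)] at ht
  exact absurd ht (by decide)

lemma pvPF_le (arg : String) (hPF : PySem.Str.startswith arg "--pretty=format:" = true) :
    PySem.Str.startswith arg "--pretty=" = true := by
  rw [PySem.Str.startswith_eq] at *
  rw [PySem.Chars.startswith_iff] at *
  exact List.IsPrefix.trans (by decide) hPF

-- per-element collapse of A's inner prefix loop
lemma pvCheck_eq (arg : String) :
    pvCheckPrefixesA arg ["--format=", "--pretty=", "--pretty=format:"]
      = ((PySem.Str.startswith arg "--format=" || PySem.Str.startswith arg "--pretty=")
          && pvDeco arg) := by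
  cases hF : PySem.Str.startswith arg "--format=" <;>
    cases hP : PySem.Str.startswith arg "--pretty=" <;>
      cases hPF : PySem.Str.startswith arg "--pretty=format:"
  · simp_all [pvCheckPrefixesA]
  · exact absurd (pvPF_le arg hPF) (by simp_all)
  · have hs2 := pvStep "--pretty=" arg (by decide) hP
    cases hD : pvDeco arg <;> simp_all [pvCheckPrefixesA]
  · have hs2 := pvStep "--pretty=" arg (by decide) hP
    have hs3 := pvStep "--pretty=format:" arg (by decide) hPF
    cases hD : pvDeco arg <;> simp_all [pvCheckPrefixesA]
  · have hs1 := pvStep "--format=" arg (by decide) hF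
    cases hD : pvDeco arg <;> simp_all [pvCheckPrefixesA]
  · exact absurd (pvPF_le arg hPF) (by simp_all)
  · exact absurd (pvNotBoth arg hF) (by simp_all)
  · exact absurd (pvNotBoth arg hF) (by simp_all)

-- spec of the shared traversal
def pvSpec : List String → Bool
  | [] => false
  | a :: rest =>
    ((PySem.Str.startswith a "--format=" || PySem.Str.startswith a "--pretty=") && pvDeco a)
    || ((a == "--format" || a == "--pretty") &&
        (match rest with | [] => false | b :: _ => pvDeco b))
    || pvSpec rest

lemma pvSpec_one (a : String) :
    pvSpec [a]
      = ((PySem.Str.startswith a "--format=" || PySem.Str.startswith a "--pretty=")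
          && pvDeco a) := by
  simp [pvSpec]

lemma pvSpec_cons_cons (a b : String) (l : List String) :
    pvSpec (a :: b :: l)
      = (((PySem.Str.startswith a "--format=" || PySem.Str.startswith a "--pretty=") && pvDeco a)
          || ((a == "--format" || a == "--pretty") && pvDeco b)
          || pvSpec (b :: l)) := rfl

lemma pvDeco_def (s : String) :
    (PySem.Str.isIn "%d" s || PySem.Str.isIn "%D" s) = pvDeco s := rfl

lemma pvLoopA_eq (args : List String) :
    ∀ (cur : List String) (idx : Nat), args.drop idx = cur →
      pvLoopA args idx cur = pvSpec cur := by
  intro cur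
  induction cur with
  | nil => intro idx h; rfl
  | cons a rest ih =>
    intro idx h
    have h1 : args.drop (idx + 1) = rest := by
      rw [← List.tail_drop, h, List.tail_cons]
    have hL : args.length - idx = rest.length + 1 := by
      have := congrArg List.length h
      simpa using this
    conv_lhs => rw [pvLoopA]
    rw [pvCheck_eq]
    cases hX : ((PySem.Str.startswith a "--format=" || PySem.Str.startswith a "--pretty=")
        && pvDeco a) with
    | true =>
      rw [if_pos (by simp)]
      cases rest with
      | nil => rw [pvSpec_one, hX]
      | cons b rest' => rw [pvSpec_cons_cons, hX]; simp
    | false =>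
      rw [if_neg (by simp)]
      cases rest with
      | nil =>
        have hge : ¬ (idx + 1 < args.length) := by
          simp only [List.length_nil] at hL; omega
        rw [if_neg (by simp [hge]), ih (idx + 1) h1, pvSpec_one, hX]
        rfl
      | cons b rest' =>
        have hlt : idx + 1 < args.length := by
          simp only [List.length_cons] at hL; omega
        have hget : args.getD (idx + 1) "" = b := by
          rw [List.getD_eq_getElem?_getD, ← List.getElem?_drop, h]
          rfl
        have hrec := ih (idx + 1) h1
        rw [pvSpec_cons_cons, hX, Bool.false_or]
        cases hM : (a == "--format" || a == "--pretty") with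
        | true =>
          rw [if_pos (by simp [hlt])]
          simp only [hget, pvDeco_def, hrec, Bool.true_and]
          cases hD : pvDeco b <;> simp
        | false =>
          rw [if_neg (by simp), hrec]; simp

-- B decomposed: the prefix-candidate pass and the lookahead-candidate pass
def pvF (l : List String) : Bool :=
  (l.filter (fun a => PySem.Str.startswith a "--format=" || PySem.Str.startswith a "--pretty=")).any
    (fun c => PySem.Str.isIn "%d" c || PySem.Str.isIn "%D" c)

def pvZ (l : List String) : Bool :=
  (((l.zip l.tail).filter (fun p => p.1 == "--format" || p.1 == "--pretty")).map Prod.snd).any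
    (fun c => PySem.Str.isIn "%d" c || PySem.Str.isIn "%D" c)

lemma pvAlt_eq_FZ (l : List String) :
    log_has_custom_decoration_format_py_alt l = (pvF l || pvZ l) := by
  rw [log_has_custom_decoration_format_py_alt, pvF, pvZ, List.any_append]

lemma pvF_cons (a : String) (l : List String) :
    pvF (a :: l)
      = (((PySem.Str.startswith a "--format=" || PySem.Str.startswith a "--pretty=") && pvDeco a)
          || pvF l) := by
  rw [pvF, List.filter_cons]
  cases hpa : (PySem.Str.startswith a "--format=" || PySem.Str.startswith a "--pretty=") <;>
    simp only [if_pos rfl, if_neg, Bool.false_eq_true, not_false_eq_true, List.any_cons,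
      pvDeco_def, pvF, hpa, Bool.false_and, Bool.false_or, Bool.true_and, ite_false, ite_true]

lemma pvZ_cons₂ (a b : String) (l : List String) :
    pvZ (a :: b :: l)
      = (((a == "--format" || a == "--pretty") && pvDeco b) || pvZ (b :: l)) := by
  rw [pvZ, List.tail_cons, List.zip_cons_cons, List.filter_cons]
  cases hm : (a == "--format" || a == "--pretty") <;>
    simp only [pvZ, List.tail_cons, List.map_cons, List.any_cons, pvDeco_def, hm, Bool.false_and,
      Bool.false_or, Bool.true_and, ite_false, ite_true, Bool.false_eq_true, not_false_eq_true,
      if_pos, if_neg]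

lemma pvAlt_eq (args : List String) :
    log_has_custom_decoration_format_py_alt args = pvSpec args := by
  induction args with
  | nil => rfl
  | cons a rest ih =>
    rw [pvAlt_eq_FZ] at ih ⊢
    rw [pvF_cons]
    cases rest with
    | nil =>
      rw [pvSpec_one]
      generalize ((PySem.Str.startswith a "--format=" || PySem.Str.startswith a "--pretty=")
          && pvDeco a) = X
      cases X <;> simp [pvF, pvZ]
    | cons b rest' =>
      rw [pvZ_cons₂, pvSpec_cons_cons, ← ih]
      generalize ((PySem.Str.startswith a "--format=" || PySem.Str.startswith a "--pretty=")
          && pvDeco a) = X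
      generalize ((a == "--format" || a == "--pretty") && pvDeco b) = Y
      generalize pvF (b :: rest') = F
      generalize pvZ (b :: rest') = Z
      cases X <;> cases Y <;> cases F <;> cases Z <;> simp

-- ===== VERDICT (by name: the statement is the Claim_ definition above) =====
theorem log_has_custom_decoration_format_py_spec : Claim_equal_log_has_custom_decoration_format_py := by
  intro args _
  unfold Spec_log_has_custom_decoration_format_py
  show log_has_custom_decoration_format_py args = log_has_custom_decoration_format_py_alt args
  rw [log_has_custom_decoration_format_py]
  exact (pvLoopA_eq args args 0 List.drop_zero).trans (pvAlt_eq args).symm
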